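-- pv_equiv track=rewrite | github.com/abdulhathi/DSA_In_All_Langs | DSA_In_Python/22_Graph/07_DFS_For_Disconnected_Graph.py | dfsForDisconnected
-- ===== SOURCE A (Python) =====
-- def dfsForDisconnected(adj):
--     visited = [False] * len(adj)
--     res = []
--     def dfs(adj, u):
--         visited[u] = True
--         res.append(u)
--         for v in adj[u]:
--             if visited[v]:
--                 continue
--             dfs(adj, v)
--
--     for s in range(len(adj)):
--         if visited[s]:
--             continue
--         dfs(adj, s)
--     return res
-- ===== SOURCE B (Python) =====
-- def dfsForDisconnected(adj):
--     n = len(adj)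
--     visited = [False] * n
--     res = []
--     for s in range(n):
--         if visited[s]:
--             continue
--         visited[s] = True
--         res.append(s)
--         stack = [list(adj[s])]
--         while stack:
--             top = stack[-1]
--             if not top:
--                 stack.pop()
--                 continue
--             v = top.pop(0)
--             if visited[v]:
--                 continue
--             visited[v] = True
--             res.append(v)
--             stack.append(list(adj[v]))
--     return res
-- ===== Notes on version B (the rewrite author's own statement) =====
-- stated objective: alternative
-- what changed: Replaces A's recursive dfs helper (call-stack recursion with a closure over visited/res) by an iterative DFS that keeps an explicit stack of pending adjacency-list suffixes, producing the identical preorder without recursion.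
import Mathlib
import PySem

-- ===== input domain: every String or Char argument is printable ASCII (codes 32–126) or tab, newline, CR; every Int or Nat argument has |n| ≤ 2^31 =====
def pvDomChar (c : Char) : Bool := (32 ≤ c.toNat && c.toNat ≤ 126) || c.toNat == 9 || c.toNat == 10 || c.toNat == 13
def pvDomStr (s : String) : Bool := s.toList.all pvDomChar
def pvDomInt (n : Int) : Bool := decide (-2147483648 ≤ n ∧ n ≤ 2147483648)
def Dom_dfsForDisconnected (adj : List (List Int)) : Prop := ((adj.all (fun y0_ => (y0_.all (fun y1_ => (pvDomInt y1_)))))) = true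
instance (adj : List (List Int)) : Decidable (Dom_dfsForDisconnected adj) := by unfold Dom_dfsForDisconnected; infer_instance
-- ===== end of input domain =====

-- B replaces A's recursive DFS helper with an explicit-stack iterative DFS (same preorder);
-- the equivalence claimed here is about the return value on inputs where A raises no IndexError.

-- ===== PORT A =====
-- A's recursive dfs; the fuel argument is a termination guard only (fuel = len(adj) at every
-- call site is never exhausted: each recursive call is guarded by 'if visited[v]: continue'
-- and marks a previously unvisited cell). State = (visited, res).
def dfsAux (adj : List (List Int)) : Nat → (List Bool × List Int) → Int → (List Bool × List Int)
  | 0, st, _ => st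
  | f + 1, (vis, res), u =>
    (PySem.List.pyGetD adj u []).foldl
      (fun st v => if PySem.List.pyGetD st.1 v true then st else dfsAux adj f st v)
      (PySem.List.pySetD vis u true, res ++ [u])

def dfsForDisconnected (adj : List (List Int)) : List Int :=
  ((PySem.List.pyRange 0 (adj.length : Int) 1).foldl
    (fun st s =>
      if PySem.List.pyGetD st.1 s true then st
      else dfsAux adj adj.length st s)
    (List.replicate adj.length false, [])).2

-- ===== PORT B =====
-- count of unvisited cells; cited by loopB's decreasing_by
def pvCountF (vis : List Bool) : Nat := vis.count false

theorem pv_count_set_true (xs : List Bool) (k : Nat) (hk : xs[k]? = some false) :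
    (xs.set k true).count false + 1 = xs.count false := by
  induction xs generalizing k with
  | nil => simp at hk
  | cons a xs ih =>
    cases k with
    | zero =>
      simp only [List.getElem?_cons_zero, Option.some.injEq] at hk
      subst hk; simp
    | succ k =>
      simp only [List.getElem?_cons_succ] at hk
      simp only [List.set, List.count_cons]
      have := ih k hk
      omega

theorem pv_mark_decr (xs : List Bool) (i : Int)
    (h : PySem.List.pyGetD xs i true = false) :
    (PySem.List.pySetD xs i true).count false + 1 = xs.count false := by
  unfold PySem.List.pyGetD PySem.List.pyGet? at h
  unfold PySem.List.pySetD PySem.List.pySet?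
  cases hidx : PySem.List.pyIdx? xs.length i with
  | none => simp [hidx] at h
  | some k =>
    simp only [hidx, Option.bind_some, Option.map_some, Option.getD_some] at h ⊢
    cases hk : xs[k]? with
    | none => simp [hk] at h
    | some b =>
      simp only [hk, Option.getD_some] at h
      subst h
      exact pv_count_set_true xs k hk

-- B's iterative DFS loop: the stack holds the still-unprocessed suffixes of adjacency
-- lists, top first.  Terminates by (unvisited count, stack size) lexicographically.
def loopB (adj : List (List Int)) : (List Bool × List Int) → List (List Int) → (List Bool × List Int)
  | st, [] => st
  | st, [] :: stk => loopB adj st stk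
  | (vis, res), (v :: rest) :: stk =>
    if h : PySem.List.pyGetD vis v true then loopB adj (vis, res) (rest :: stk)
    else
      loopB adj (PySem.List.pySetD vis v true, res ++ [v])
        ((PySem.List.pyGetD adj v []) :: rest :: stk)
  termination_by st stk => (pvCountF st.1, (stk.map (fun l => l.length)).sum + stk.length)
  decreasing_by
  all_goals first
    | (apply Prod.Lex.right; simp; omega)
    | (apply Prod.Lex.right; simp)
    | (apply Prod.Lex.left
       have := pv_mark_decr _ _ (by simpa using h)
       simp only [pvCountF]
       omega)

def dfsForDisconnected_alt (adj : List (List Int)) : List Int :=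
  ((PySem.List.pyRange 0 (adj.length : Int) 1).foldl
    (fun st s =>
      if PySem.List.pyGetD st.1 s true then st
      else loopB adj (PySem.List.pySetD st.1 s true, st.2 ++ [s]) [PySem.List.pyGetD adj s []])
    (List.replicate adj.length false, [])).2

-- ===== PRECONDITION & SPEC =====
-- Pre_ excludes exactly the inputs on which A raises IndexError: some adjacency entry v
-- outside [-len(adj), len(adj)) — the traversal reaches every list, so every such v is hit.
def Pre_dfsForDisconnected (adj : List (List Int)) : Prop :=
  ∀ l ∈ adj, ∀ v ∈ l, PySem.Raise.InRange adj.length v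
instance (adj : List (List Int)) : Decidable (Pre_dfsForDisconnected adj) := by
  unfold Pre_dfsForDisconnected; infer_instance

def pvWitness_dfsForDisconnected : List (List Int) := [[1, -1], [0], []]

def Spec_dfsForDisconnected (adj : List (List Int)) (out : List Int) : Prop := out = dfsForDisconnected_alt adj
instance (adj : List (List Int)) (out : List Int) : Decidable (Spec_dfsForDisconnected adj out) := by unfold Spec_dfsForDisconnected; infer_instance

-- ===== CLAIM (what is proved, stated in full; the proofs are below) =====
def Claim_equal_dfsForDisconnected : Prop := ∀ (adj : List (List Int)), Dom_dfsForDisconnected adj → Pre_dfsForDisconnected adj → Spec_dfsForDisconnected adj (dfsForDisconnected adj)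

-- ===== LEMMAS AND PROOFS =====

-- A's inner fold over a neighbour list, with fuel f for the recursive calls
def foldA (adj : List (List Int)) (f : Nat) (st : List Bool × List Int) (l : List Int) :
    List Bool × List Int :=
  l.foldl (fun st v => if PySem.List.pyGetD st.1 v true then st else dfsAux adj f st v) st

theorem dfsAux_succ (adj : List (List Int)) (f : Nat) (vis : List Bool) (res : List Int) (u : Int) :
    dfsAux adj (f + 1) (vis, res) u =
      foldA adj f (PySem.List.pySetD vis u true, res ++ [u]) (PySem.List.pyGetD adj u []) := rfl

theorem foldA_cons (adj : List (List Int)) (f : Nat) (st : List Bool × List Int)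
    (v : Int) (vs : List Int) :
    foldA adj f st (v :: vs) =
      foldA adj f (if PySem.List.pyGetD st.1 v true then st else dfsAux adj f st v) vs := rfl

theorem pv_guard_false_pos (xs : List Bool) (i : Int)
    (h : PySem.List.pyGetD xs i true = false) : 1 ≤ xs.count false := by
  have := pv_mark_decr xs i h; omega

theorem pv_count_set_true_le (xs : List Bool) (k : Nat) :
    (xs.set k true).count false ≤ xs.count false := by
  induction xs generalizing k with
  | nil => simp
  | cons a xs ih =>
    cases k with
    | zero => cases a <;> simp [List.count_cons]
    | succ k =>
      simp only [List.set, List.count_cons]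
      have := ih k
      omega

theorem pv_mark_le (xs : List Bool) (i : Int) :
    (PySem.List.pySetD xs i true).count false ≤ xs.count false := by
  unfold PySem.List.pySetD PySem.List.pySet?
  cases hidx : PySem.List.pyIdx? xs.length i with
  | none => simp
  | some k => simpa using pv_count_set_true_le xs k

theorem pv_mark_length (xs : List Bool) (i : Int) :
    (PySem.List.pySetD xs i true).length = xs.length :=
  PySem.List.length_pySetD xs i true

-- dfsAux preserves the length of visited and never increases the unvisited count
theorem dfsAux_inv (adj : List (List Int)) :
    ∀ (f : Nat) (st : List Bool × List Int) (u : Int),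
      (dfsAux adj f st u).1.length = st.1.length ∧
      (dfsAux adj f st u).1.count false ≤ st.1.count false := by
  intro f
  induction f with
  | zero => intro st u; exact ⟨rfl, le_refl _⟩
  | succ f ih =>
    have hfold : ∀ (l : List Int) (st : List Bool × List Int),
        (foldA adj f st l).1.length = st.1.length ∧
        (foldA adj f st l).1.count false ≤ st.1.count false := by
      intro l
      induction l with
      | nil => intro st; exact ⟨rfl, le_refl _⟩
      | cons v vs ihl =>
        intro st
        rw [foldA_cons]
        by_cases hc : PySem.List.pyGetD st.1 v true
        · simpa [hc] using ihl st
        · have h1 := ih st v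
          have h2 := ihl (dfsAux adj f st v)
          simp only [hc]
          exact ⟨h2.1.trans h1.1, h2.2.trans h1.2⟩
    intro st u
    obtain ⟨vis, res⟩ := st
    rw [dfsAux_succ]
    have h := hfold (PySem.List.pyGetD adj u []) (PySem.List.pySetD vis u true, res ++ [u])
    exact ⟨h.1.trans (pv_mark_length vis u), h.2.trans (pv_mark_le vis u)⟩

theorem foldA_inv (adj : List (List Int)) (f : Nat) :
    ∀ (l : List Int) (st : List Bool × List Int),
      (foldA adj f st l).1.length = st.1.length ∧
      (foldA adj f st l).1.count false ≤ st.1.count false := by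
  intro l
  induction l with
  | nil => intro st; exact ⟨rfl, le_refl _⟩
  | cons v vs ihl =>
    intro st
    rw [foldA_cons]
    by_cases hc : PySem.List.pyGetD st.1 v true
    · simpa [hc] using ihl st
    · have h1 := dfsAux_inv adj f st v
      have h2 := ihl (dfsAux adj f st v)
      simp only [hc]
      exact ⟨h2.1.trans h1.1, h2.2.trans h1.2⟩

-- loopB equations in usable form
theorem loopB_nil (adj : List (List Int)) (st : List Bool × List Int) :
    loopB adj st [] = st := by
  obtain ⟨vis, res⟩ := st; simp [loopB]

theorem loopB_pop (adj : List (List Int)) (st : List Bool × List Int) (stk : List (List Int)) :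
    loopB adj st ([] :: stk) = loopB adj st stk := by
  obtain ⟨vis, res⟩ := st; simp [loopB]

theorem loopB_skip (adj : List (List Int)) (vis : List Bool) (res : List Int)
    (v : Int) (rest : List Int) (stk : List (List Int))
    (h : PySem.List.pyGetD vis v true = true) :
    loopB adj (vis, res) ((v :: rest) :: stk) = loopB adj (vis, res) (rest :: stk) := by
  simp [loopB, h]

theorem loopB_visit (adj : List (List Int)) (vis : List Bool) (res : List Int)
    (v : Int) (rest : List Int) (stk : List (List Int))
    (h : PySem.List.pyGetD vis v true = false) :
    loopB adj (vis, res) ((v :: rest) :: stk) =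
      loopB adj (PySem.List.pySetD vis v true, res ++ [v])
        ((PySem.List.pyGetD adj v []) :: rest :: stk) := by
  simp [loopB, h]

-- simulation: running B's stack loop with one more list on the stack is A's fold over it
theorem loopB_sim (adj : List (List Int)) :
    ∀ (c f : Nat) (l : List Int) (st : List Bool × List Int) (stk : List (List Int)),
      st.1.count false ≤ c → st.1.count false ≤ f →
      loopB adj st (l :: stk) = loopB adj (foldA adj f st l) stk := by
  intro c
  induction c using Nat.strong_induction_on with
  | _ c ihc =>
    intro f l
    induction l generalizing f with
    | nil =>
      intro st stk _ _
      rw [loopB_pop]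
      rfl
    | cons v vs ihl =>
      intro st stk h1 h2
      obtain ⟨vis, res⟩ := st
      by_cases hc : PySem.List.pyGetD vis v true
      · rw [loopB_skip adj vis res v vs stk hc, foldA_cons]
        simp only [hc, if_true]
        exact ihl f (vis, res) stk h1 h2
      · have hfalse : PySem.List.pyGetD vis v true = false := by simpa using hc
        have hdec := pv_mark_decr vis v hfalse
        have hpos := pv_guard_false_pos vis v hfalse
        simp only at h1 h2
        obtain ⟨c', rfl⟩ : ∃ c', c = c' + 1 := ⟨c - 1, by omega⟩
        have hc' : c' < c' + 1 := Nat.lt_succ_self c'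
        cases f with
        | zero => omega
        | succ g =>
          have hst' : (PySem.List.pySetD vis v true).count false ≤ c' := by omega
          have e2 := ihc c' hc' g (PySem.List.pyGetD adj v [])
            (PySem.List.pySetD vis v true, res ++ [v]) (vs :: stk)
            (by simpa using hst') (by simp; omega)
          have hinv := foldA_inv adj g (PySem.List.pyGetD adj v [])
            (PySem.List.pySetD vis v true, res ++ [v])
          rw [loopB_visit adj vis res v vs stk hfalse, e2, ← dfsAux_succ adj g vis res v,
            foldA_cons]
          simp only [hfalse, Bool.false_eq_true]
          exact ihc c' hc' (g + 1) vs (dfsAux adj (g + 1) (vis, res) v) stk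
            (by rw [dfsAux_succ adj g vis res v]; simp only at hinv ⊢; omega)
            (by rw [dfsAux_succ adj g vis res v]; simp only at hinv ⊢; omega)

-- fold two equal-step functions over a list, carrying an invariant
theorem pv_foldl_congr_inv {alpha sigma : Type} (P : sigma → Prop) (f g : sigma → alpha → sigma)
    (hP : ∀ st a, P st → P (f st a)) (hfg : ∀ st a, P st → f st a = g st a) :
    ∀ (l : List alpha) (st : sigma), P st → l.foldl f st = l.foldl g st := by
  intro l
  induction l with
  | nil => intro st _; rfl
  | cons a l ih =>
    intro st hst
    simp only [List.foldl_cons]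
    rw [← hfg st a hst]
    exact ih (f st a) (hP st a hst)

-- ===== VERDICT (by name: the statement is the Claim_ definition above) =====
theorem dfsForDisconnected_spec : Claim_equal_dfsForDisconnected := by
  intro adj _ _
  unfold Spec_dfsForDisconnected dfsForDisconnected dfsForDisconnected_alt
  have := pv_foldl_congr_inv (fun st : List Bool × List Int => st.1.length = adj.length)
    (fun st s => if PySem.List.pyGetD st.1 s true then st else dfsAux adj adj.length st s)
    (fun st s => if PySem.List.pyGetD st.1 s true then st
      else loopB adj (PySem.List.pySetD st.1 s true, st.2 ++ [s]) [PySem.List.pyGetD adj s []])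
    ?hP ?hfg (PySem.List.pyRange 0 (adj.length : Int) 1) (List.replicate adj.length false, [])
    (by simp)
  · rw [this]
  case hP =>
    intro st s hst
    by_cases hc : PySem.List.pyGetD st.1 s true
    · simpa [hc] using hst
    · simp only [hc]
      exact (dfsAux_inv adj adj.length st s).1.trans hst
  case hfg =>
    intro st s hst
    obtain ⟨vis, res⟩ := st
    simp only at hst
    by_cases hc : PySem.List.pyGetD vis s true
    · simp [hc]
    · have hfalse : PySem.List.pyGetD vis s true = false := by simpa using hc
      have hdec := pv_mark_decr vis s hfalse
      have hpos := pv_guard_false_pos vis s hfalse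
      have hcl : vis.count false ≤ vis.length := List.count_le_length
      obtain ⟨m, hm⟩ : ∃ m, adj.length = m + 1 := ⟨adj.length - 1, by omega⟩
      have hcnt : (PySem.List.pySetD vis s true).count false ≤ m := by omega
      simp only [hc]
      rw [loopB_sim adj m m (PySem.List.pyGetD adj s [])
            (PySem.List.pySetD vis s true, res ++ [s]) []
            (by simpa using hcnt) (by simpa using hcnt),
          loopB_nil, hm, dfsAux_succ]
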